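-- pv_equiv track=rewrite | github.com/yhs3434/Algorithms | programmers/etc/numberGame.py | solution
-- ===== SOURCE A (Python) =====
-- def solution(A, B):
--     answer = 0
--
--     A.sort()
--     B.sort()
--
--     isWin(A,B,3)
--
--     left = 0
--     right = len(A)
--     while left <= right:
--         mid = (left + right) // 2
--
--         if isWin(A, B, mid):
--             left = mid + 1
--             if mid > answer:
--                 answer = mid
--         else:
--             right = mid - 1
--
--     return answer
--
-- def isWin(A, B, n):
--     a = A[:n]
--     b = B[-n:]
--     while a:
--         if a.pop() >= b.pop():
--             return False
--     return True
-- ===== SOURCE B (Python) =====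
-- def solution(A, B):
--     # Same in-place sorts as the original, then one greedy two-pointer pass
--     # instead of a binary search over the "top-n of B beat bottom-n of A" predicate.
--     A.sort()
--     B.sort()
--     i = len(A) - 1
--     j = len(B) - 1
--     wins = 0
--     while i >= 0 and j >= 0:
--         if A[i] < B[j]:
--             wins += 1
--             j -= 1
--         i -= 1
--     return wins
-- ===== Notes on version B (the rewrite author's own statement) =====
-- stated objective: faster
-- what changed: Replaces the binary search that re-checks the win predicate with a fresh O(n) slice-and-pop pass at every probe by a single greedy two-pointer pass over the two sorted lists (count a win and advance both pointers when B's current beats A's, else advance only A).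
-- outside the precondition, e.g. on solution([1, 9], [5]): A returns 1, B returns 1; on solution([1, 2], [5]): A raises IndexError, B returns 1
import Mathlib
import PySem

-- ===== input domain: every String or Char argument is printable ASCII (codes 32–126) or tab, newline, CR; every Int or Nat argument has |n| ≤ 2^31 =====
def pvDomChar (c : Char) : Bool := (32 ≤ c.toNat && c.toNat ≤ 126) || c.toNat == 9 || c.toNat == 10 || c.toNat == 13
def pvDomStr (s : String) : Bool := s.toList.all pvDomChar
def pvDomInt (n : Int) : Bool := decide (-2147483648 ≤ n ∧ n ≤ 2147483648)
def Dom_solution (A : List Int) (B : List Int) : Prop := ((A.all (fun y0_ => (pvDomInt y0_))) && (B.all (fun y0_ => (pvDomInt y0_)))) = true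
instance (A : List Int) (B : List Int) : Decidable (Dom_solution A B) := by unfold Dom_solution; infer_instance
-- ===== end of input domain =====

-- B replaces A's binary search over the "top-n of B beat bottom-n of A" predicate by one
-- greedy two-pointer pass over the sorted lists (objective: faster win-counting phase).
-- Both Pythons sort A and B in place; the equivalence proved here is about the return value.

-- ===== PORT A =====
-- A's isWin pops from the END of a = A[:n] and b = B[-n:]; the while-loop is transcribed as
-- structural recursion on the REVERSED slices (each pop = taking the head of the reverse).
def isWinLoop : List Int → List Int → Option Bool
  | [], _ => some true
  | _ :: _, [] => none          -- b.pop() on an exhausted b: IndexError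
  | x :: xs, y :: ys => if x ≥ y then some false else isWinLoop xs ys

def isWinPort (A B : List Int) (n : Int) : Option Bool :=
  isWinLoop (PySem.List.slice A none (some n)).reverse
            (PySem.List.slice B (some (-n)) none).reverse

-- the while left <= right loop, with its three mutable variables as parameters
def bsearchA (A B : List Int) (left right answer : Int) : Int :=
  if h : left ≤ right then
    let mid := PySem.Int.floordiv (left + right) 2
    match isWinPort A B mid with
    | none => answer            -- Python raises IndexError here (outside Pre_)
    | some true => bsearchA A B (mid + 1) right (if answer < mid then mid else answer)
    | some false => bsearchA A B left (mid - 1) answer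
  else answer
termination_by ((right + 1) - left).toNat
decreasing_by
  · have := PySem.Int.floordiv_two_mid_bounds h
    omega
  · have := PySem.Int.floordiv_two_mid_bounds h
    omega

def solution (A : List Int) (B : List Int) : Int :=
  let As := PySem.List.sorted A (fun x => x) false
  let Bs := PySem.List.sorted B (fun x => x) false
  match isWinPort As Bs 3 with        -- the discarded probe isWin(A,B,3); Python raises if it pops an empty b
  | none => 0                         -- IndexError (outside Pre_)
  | some _ => bsearchA As Bs 0 (As.length : Int) 0

-- ===== PORT B =====
-- Source B walks i over sorted A and j over sorted B from the top down; transcribed as structural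
-- recursion on the reversed sorted lists (head = current largest element).
def greedyLoop : List Int → List Int → Int
  | [], _ => 0
  | _ :: _, [] => 0
  | x :: xs, y :: ys => if x < y then 1 + greedyLoop xs ys else greedyLoop xs (y :: ys)

def solution_alt (A : List Int) (B : List Int) : Int :=
  greedyLoop (PySem.List.sorted A (fun x => x) false).reverse
             (PySem.List.sorted B (fun x => x) false).reverse

-- ===== PRECONDITION & SPEC =====
-- Pre_ excludes pairs with len(A) > len(B): there A's probe isWin(A,B,3) or a search probe can
-- pop from an exhausted b and raise IndexError; where A happens to return anyway, the value is
-- an artefact of slicing mismatched hands and the claim does not cover it.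
def Pre_solution (A : List Int) (B : List Int) : Prop := A.length ≤ B.length
instance (A : List Int) (B : List Int) : Decidable (Pre_solution A B) := by unfold Pre_solution; infer_instance
def pvWitness_solution : List Int × List Int := ([1, 3], [2, 4])

def Spec_solution (A : List Int) (B : List Int) (out : Int) : Prop := out = solution_alt A B
instance (A : List Int) (B : List Int) (out : Int) : Decidable (Spec_solution A B out) := by unfold Spec_solution; infer_instance

-- ===== CLAIM (what is proved, stated in full; the proofs are below) =====
def Claim_equal_solution : Prop := ∀ (A : List Int) (B : List Int), Dom_solution A B → Pre_solution A B → Spec_solution A B (solution A B)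

-- ===== LEMMAS AND PROOFS =====

-- the win predicate, on the reversed (descending) sorted lists:
-- the bottom n of u (its last n elements) lose pointwise to the top n of v (its first n elements)
def Win (u v : List Int) (n : Nat) : Prop :=
  List.Forall₂ (· < ·) (u.drop (u.length - n)) (v.take n)

theorem isWinLoop_eval : ∀ (u v : List Int), u.length ≤ v.length →
    ∃ b, isWinLoop u v = some b ∧ (b = true ↔ List.Forall₂ (· < ·) u (v.take u.length)) := by
  intro u
  induction u with
  | nil => intro v _; exact ⟨true, rfl, by simp⟩
  | cons x xs ih =>
    intro v h
    cases v with
    | nil => simp at h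
    | cons y ys =>
      simp only [List.length_cons, Nat.add_le_add_iff_right] at h
      by_cases hxy : x ≥ y
      · refine ⟨false, by simp [isWinLoop, hxy], ?_⟩
        simp only [List.length_cons, List.take_succ_cons, List.forall₂_cons]
        constructor
        · intro hf; exact absurd hf (by simp)
        · intro ⟨hlt, _⟩; omega
      · obtain ⟨b, hb, hiff⟩ := ih ys h
        refine ⟨b, by simp [isWinLoop, hxy, hb], ?_⟩
        simp only [List.length_cons, List.take_succ_cons, List.forall₂_cons]
        rw [hiff]
        constructor
        · intro hf; exact ⟨by omega, hf⟩
        · intro ⟨_, hf⟩; exact hf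

theorem greedy_nonneg_le : ∀ (u v : List Int),
    0 ≤ greedyLoop u v ∧ greedyLoop u v ≤ (u.length : Int) := by
  intro u
  induction u with
  | nil => intro v; simp [greedyLoop]
  | cons x xs ih =>
    intro v
    cases v with
    | nil => refine ⟨by simp [greedyLoop], by simp [greedyLoop]; positivity⟩
    | cons y ys =>
      simp only [greedyLoop, List.length_cons]
      split
      · have := ih ys; push_cast; omega
      · have := ih (y :: ys); push_cast; omega

theorem win_le_greedy : ∀ (u v : List Int) (n : Nat), n ≤ u.length →
    Win u v n → (n : Int) ≤ greedyLoop u v := by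
  intro u
  induction u with
  | nil =>
    intro v n hn _
    simp only [List.length_nil, Nat.le_zero] at hn
    simp [hn, greedyLoop]
  | cons x xs ih =>
    intro v n hn h
    cases v with
    | nil =>
      unfold Win at h
      simp only [List.take_nil, List.forall₂_nil_right_iff, List.drop_eq_nil_iff,
        List.length_cons] at h
      have : n = 0 := by omega
      subst this
      exact (greedy_nonneg_le (x :: xs) []).1
    | cons y ys =>
      simp only [greedyLoop]
      split
      · -- x < y : advance both
        rename_i hxy
        cases n with
        | zero => have := greedy_nonneg_le xs ys; omega
        | succ m =>
          have hm : m ≤ xs.length := by simpa using hn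
          have hwin : Win xs ys m := by
            unfold Win at h ⊢
            simp only [List.length_cons, List.take_succ_cons] at h
            rcases Nat.lt_or_ge m xs.length with hlt | hge
            · have he : xs.length + 1 - (m + 1) = (xs.length - m - 1) + 1 := by omega
              rw [he, List.drop_succ_cons] at h
              rw [List.drop_eq_getElem_cons (by omega : xs.length - m - 1 < xs.length)] at h
              rcases h with _ | ⟨_, htail⟩
              have he2 : xs.length - m - 1 + 1 = xs.length - m := by omega
              rwa [he2] at htail
            · have hme : m = xs.length := by omega
              subst hme
              simp only [Nat.sub_self, List.drop_zero] at h ⊢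
              rcases h with _ | ⟨_, htail⟩
              exact htail
          have := ih ys m hm hwin
          push_cast
          omega
      · -- x ≥ y : skip x
        rename_i hxy
        have hn' : n ≤ xs.length := by
          by_contra hc
          have hne : n = xs.length + 1 := by simp only [List.length_cons] at hn; omega
          unfold Win at h
          rw [hne] at h
          simp only [List.length_cons, Nat.sub_self, List.drop_zero,
            List.take_succ_cons, List.forall₂_cons] at h
          omega
        apply ih (y :: ys) n hn'
        unfold Win at h ⊢
        simp only [List.length_cons] at h
        have he : xs.length + 1 - n = (xs.length - n) + 1 := by omega
        rw [he, List.drop_succ_cons] at h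
        exact h

theorem win_greedy (u v : List Int) (hu : u.Pairwise (fun a b => b ≤ a)) :
    Win u v (greedyLoop u v).toNat := by
  induction u generalizing v with
  | nil => unfold Win greedyLoop; simp
  | cons x xs ih =>
    rcases List.pairwise_cons.mp hu with ⟨hx, hu'⟩
    cases v with
    | nil => unfold Win greedyLoop; simp
    | cons y ys =>
      simp only [greedyLoop]
      split
      · -- x < y
        rename_i hxy
        have hnn := (greedy_nonneg_le xs ys).1
        have hle : greedyLoop xs ys ≤ (xs.length : Int) := (greedy_nonneg_le xs ys).2
        have htn : (1 + greedyLoop xs ys).toNat = (greedyLoop xs ys).toNat + 1 := by omega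
        rw [htn]
        set k := (greedyLoop xs ys).toNat with hk
        have hkle : k ≤ xs.length := by omega
        have hbase : Win xs ys k := ih ys hu'
        unfold Win at hbase ⊢
        simp only [List.length_cons, List.take_succ_cons]
        rcases Nat.lt_or_ge k xs.length with hlt | hge
        · have he : xs.length + 1 - (k + 1) = (xs.length - k - 1) + 1 := by omega
          rw [he, List.drop_succ_cons,
            List.drop_eq_getElem_cons (by omega : xs.length - k - 1 < xs.length)]
          have he2 : xs.length - k - 1 + 1 = xs.length - k := by omega
          rw [he2]
          exact List.Forall₂.cons (by
            have := hx _ (List.getElem_mem (by omega : xs.length - k - 1 < xs.length))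
            omega) hbase
        · have hke : k = xs.length := by omega
          rw [hke] at hbase ⊢
          simp only [Nat.add_sub_cancel_left, Nat.add_sub_cancel, Nat.sub_self,
            List.drop_zero] at hbase ⊢
          exact List.Forall₂.cons hxy hbase
      · -- x ≥ y : skip x
        rename_i hxy
        have hbase : Win xs (y :: ys) ((greedyLoop xs (y :: ys)).toNat) := ih (y :: ys) hu'
        have hkle : (greedyLoop xs (y :: ys)).toNat ≤ xs.length := by
          have := greedy_nonneg_le xs (y :: ys); omega
        unfold Win at hbase ⊢
        simp only [List.length_cons]
        have he : xs.length + 1 - (greedyLoop xs (y :: ys)).toNat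
            = (xs.length - (greedyLoop xs (y :: ys)).toNat) + 1 := by omega
        rw [he, List.drop_succ_cons]
        exact hbase

theorem win_pred (u v : List Int) (hu : u.Pairwise (fun a b => b ≤ a))
    (n : Nat) (hn : n + 1 ≤ u.length) (h : Win u v (n + 1)) : Win u v n := by
  unfold Win at h ⊢
  rw [List.forall₂_iff_get] at h ⊢
  obtain ⟨hlen, hget⟩ := h
  simp only [List.length_drop, List.length_take] at hlen
  have hvlen : n + 1 ≤ v.length := by omega
  refine ⟨by simp; omega, ?_⟩
  intro i h₁ h₂
  simp only [List.length_drop] at h₁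
  simp only [List.length_take] at h₂
  have hi : i < n := by omega
  have h1' : i < (u.drop (u.length - (n + 1))).length := by simp; omega
  have h2' : i < (v.take (n + 1)).length := by simp; omega
  have := hget i h1' h2'
  simp only [List.get_eq_getElem, List.getElem_drop, List.getElem_take] at this ⊢
  have hmono := List.pairwise_iff_getElem.mp hu (u.length - (n + 1) + i) (u.length - n + i)
    (by omega) (by omega) (by omega)
  omega

theorem win_mono (u v : List Int) (hu : u.Pairwise (fun a b => b ≤ a)) :
    ∀ (m : Nat), m ≤ u.length → Win u v m → ∀ n ≤ m, Win u v n := by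
  intro m
  induction m with
  | zero => intro _ h n hn; simpa [Nat.le_zero.mp hn] using h
  | succ m ih =>
    intro hm h n hn
    rcases Nat.lt_or_ge n (m + 1) with hlt | hge
    · exact ih (by omega) (win_pred u v hu m hm h) n (by omega)
    · have : n = m + 1 := by omega
      subst this; exact h

theorem win_iff_le_greedy (u v : List Int) (hu : u.Pairwise (fun a b => b ≤ a))
    (n : Nat) (hn : n ≤ u.length) : Win u v n ↔ (n : Int) ≤ greedyLoop u v := by
  constructor
  · exact win_le_greedy u v n hn
  · intro hle
    have hk : (greedyLoop u v).toNat ≤ u.length := by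
      have := greedy_nonneg_le u v; omega
    exact win_mono u v hu (greedyLoop u v).toNat hk (win_greedy u v hu) n (by omega)

theorem isWinPort_eval (As Bs : List Int) (hlen : As.length ≤ Bs.length)
    (n : Int) (h0 : 0 ≤ n) (hn : n.toNat ≤ As.length) :
    ∃ b, isWinPort As Bs n = some b ∧ (b = true ↔ Win As.reverse Bs.reverse n.toNat) := by
  unfold isWinPort
  rcases eq_or_lt_of_le h0 with hz | hpos
  · -- n = 0 : a = [], b = whole B; isWin returns True and Win _ _ 0 holds
    have hz' : n = 0 := hz.symm
    subst hz'
    refine ⟨true, ?_, ?_⟩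
    · rw [PySem.List.slice_to As (by omega)]
      simp [isWinLoop]
    · simp only [true_iff]
      unfold Win
      simp [List.drop_length]
  · set k := n.toNat with hk
    have hk1 : 0 < k := by omega
    have hnk : n = (k : Int) := by omega
    rw [hnk, PySem.List.slice_to As (by positivity), PySem.List.slice_from_neg_natCast Bs k hk1]
    have hkk : ((k : Int)).toNat = k := by omega
    rw [hkk, List.reverse_take, List.reverse_drop]
    have hkB : k ≤ Bs.length := le_trans hn hlen
    have hbt : Bs.length - (Bs.length - k) = k := by omega
    rw [hbt]
    have hul : (As.reverse.drop (As.length - k)).length = k := by simp; omega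
    have hvl : (Bs.reverse.take k).length = k := by simp; omega
    obtain ⟨b, hb, hiff⟩ := isWinLoop_eval (As.reverse.drop (As.length - k))
      (Bs.reverse.take k) (by omega)
    refine ⟨b, hb, ?_⟩
    rw [hiff]
    unfold Win
    rw [hul, List.take_take, Nat.min_self, List.length_reverse]

theorem isWinPort_probe (As Bs : List Int) (hlen : As.length ≤ Bs.length) :
    isWinPort As Bs 3 ≠ none := by
  unfold isWinPort
  rw [PySem.List.slice_to As (by omega), PySem.List.slice_from_neg_ofNat Bs 3 (by omega)]
  obtain ⟨b, hb, _⟩ := isWinLoop_eval (As.take (3 : Int).toNat).reverse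
    (Bs.drop (Bs.length - 3)).reverse (by simp; omega)
  rw [hb]
  simp

theorem bsearch_correct (As Bs : List Int) (G : Int)
    (hG0 : 0 ≤ G) (hGL : G ≤ (As.length : Int))
    (hiff : ∀ mid : Int, 0 ≤ mid → mid ≤ (As.length : Int) →
      ∃ b, isWinPort As Bs mid = some b ∧ (b = true ↔ mid ≤ G)) :
    ∀ (left right answer : Int), 0 ≤ left → right ≤ (As.length : Int) →
      left ≤ G + 1 → G ≤ right →
      ((1 ≤ left ∧ answer = left - 1) ∨ (left = 0 ∧ answer = 0)) →
      bsearchA As Bs left right answer = G := by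
  suffices H : ∀ (f : Nat) (left right answer : Int), (right + 1 - left).toNat = f →
      0 ≤ left → right ≤ (As.length : Int) → left ≤ G + 1 → G ≤ right →
      ((1 ≤ left ∧ answer = left - 1) ∨ (left = 0 ∧ answer = 0)) →
      bsearchA As Bs left right answer = G by
    intro left right answer h1 h2 h3 h4 h5
    exact H _ left right answer rfl h1 h2 h3 h4 h5
  intro f
  induction f using Nat.strong_induction_on with
  | _ f IHf =>
  intro left right answer hf h0 hR hL hG hans
  rw [bsearchA]
  by_cases hlr : left ≤ right
  · rw [dif_pos hlr]
    have hmb := PySem.Int.floordiv_two_mid_bounds hlr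
    set mid := PySem.Int.floordiv (left + right) 2 with hmid
    have h0m : 0 ≤ mid := le_trans h0 hmb.1
    have hmL : mid ≤ (As.length : Int) := le_trans hmb.2 hR
    obtain ⟨b, hb, hbiff⟩ := hiff mid h0m hmL
    cases b with
    | true =>
      simp only [hb]
      have hmidG : mid ≤ G := hbiff.mp rfl
      have hne : (if answer < mid then mid else answer) = mid := by
        split_ifs with hc
        · rfl
        · rcases hans with ⟨_, ha⟩ | ⟨hl0, ha⟩ <;> omega
      rw [hne]
      exact IHf (right + 1 - (mid + 1)).toNat (by omega) (mid + 1) right mid rfl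
        (by omega) hR (by omega) hG (by omega)
    | false =>
      simp only [hb]
      have hmidG : G < mid := by
        rcases Int.lt_or_le G mid with h | h
        · exact h
        · exact absurd (hbiff.mpr h) (by simp)
      exact IHf (mid - 1 + 1 - left).toNat (by omega) left (mid - 1) answer rfl
        h0 (by omega) hL (by omega) hans
  · rw [dif_neg hlr]
    rcases hans with ⟨h1, ha⟩ | ⟨hl0, ha⟩ <;> omega

-- ===== VERDICT (by name: the statement is the Claim_ definition above) =====
theorem solution_spec : Claim_equal_solution := by
  intro A B _ hpre
  unfold Spec_solution solution solution_alt
  set As := PySem.List.sorted A (fun x => x) false with hAs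
  set Bs := PySem.List.sorted B (fun x => x) false with hBs
  have hlen : As.length ≤ Bs.length := by
    rw [hAs, hBs, PySem.List.length_sorted, PySem.List.length_sorted]; exact hpre
  have hra : As.reverse.Pairwise (fun a b => b ≤ a) := by
    rw [List.pairwise_reverse]
    simpa using PySem.List.sorted_pairwise A (fun x => x)
  have hG0 := (greedy_nonneg_le As.reverse Bs.reverse).1
  have hGL : greedyLoop As.reverse Bs.reverse ≤ (As.length : Int) := by
    have := (greedy_nonneg_le As.reverse Bs.reverse).2
    simpa using this
  cases hp : isWinPort As Bs 3 with
  | none => exact absurd hp (isWinPort_probe As Bs hlen)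
  | some v =>
    simp only []
    rw [hp]
    apply bsearch_correct As Bs (greedyLoop As.reverse Bs.reverse) hG0 hGL
    · intro mid h0m hmL
      obtain ⟨b, hb, hiffWin⟩ := isWinPort_eval As Bs hlen mid h0m (by omega)
      refine ⟨b, hb, ?_⟩
      rw [hiffWin, win_iff_le_greedy As.reverse Bs.reverse hra mid.toNat
        (by simp; omega)]
      have : ((mid.toNat : Nat) : Int) = mid := by omega
      rw [this]
    · omega
    · exact le_refl _
    · omega
    · exact hGL
    · exact Or.inr ⟨rfl, rfl⟩
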